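-- pv_equiv track=rewrite | github.com/lyzno1/lightning_example | sentiment_transformer.py | create_vocab_and_encode
-- ===== SOURCE A (Python) =====
-- def create_vocab_and_encode(text_data):
--     vocab = {}
--     encoded_data = []
--     idx = 1
--     for doc in text_data:
--         encoded_doc = []
--         for word in doc:
--             if word not in vocab:
--                 vocab[word] = idx
--                 idx += 1
--             encoded_doc.append(vocab[word])
--         encoded_data.append(encoded_doc)
--     return vocab, encoded_data
-- ===== SOURCE B (Python) =====
-- def create_vocab_and_encode(text_data):
--     # Pass 1: build the vocabulary alone, id = current table size + 1 (first-appearance order).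
--     vocab = {}
--     for doc in text_data:
--         for word in doc:
--             if word not in vocab:
--                 vocab[word] = len(vocab) + 1
--     # Pass 2: encode every document against the finished table.
--     encoded_data = [[vocab[word] for word in doc] for doc in text_data]
--     return vocab, encoded_data
-- ===== Notes on version B (the rewrite author's own statement) =====
-- stated objective: alternative
-- what changed: Replaces the single interleaved loop carrying (vocab, encoded, idx) with two separate passes: one pass builds the vocabulary using len(vocab)+1 as the next id, then a nested comprehension encodes all documents against the finished table.
import Mathlib
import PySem

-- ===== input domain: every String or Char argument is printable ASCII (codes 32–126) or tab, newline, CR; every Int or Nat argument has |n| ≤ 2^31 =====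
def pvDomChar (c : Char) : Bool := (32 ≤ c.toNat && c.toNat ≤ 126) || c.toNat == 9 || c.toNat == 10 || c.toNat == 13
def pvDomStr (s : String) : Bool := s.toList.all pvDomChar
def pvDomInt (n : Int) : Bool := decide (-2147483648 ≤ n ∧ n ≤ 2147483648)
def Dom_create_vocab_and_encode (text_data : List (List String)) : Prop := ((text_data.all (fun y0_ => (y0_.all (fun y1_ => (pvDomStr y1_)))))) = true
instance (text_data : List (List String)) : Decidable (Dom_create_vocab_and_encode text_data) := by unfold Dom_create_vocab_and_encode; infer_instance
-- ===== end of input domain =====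

-- B separates A's single interleaved loop into two passes: a vocab-building fold (id = size+1) and a
-- pure map encoding every document against the finished table (alternative decomposition, same cost).


-- ===== PORT A =====
-- inner loop body: possibly insert `word` at id `idx`, then append vocab[word]
-- (after the branch the key is always present, so `getD word 0` is exactly Python's vocab[word])
def pvAStepWord (st : PySem.Dict String Int × List Int × Int) (word : String) :
    PySem.Dict String Int × List Int × Int :=
  let vocab := st.1
  let vocab' := if vocab.contains word then vocab else vocab.insert word st.2.2
  let idx' := if vocab.contains word then st.2.2 else st.2.2 + 1
  (vocab', st.2.1 ++ [vocab'.getD word 0], idx')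

-- outer loop body: encode one document with a fresh encoded_doc accumulator
def pvAStepDoc (st : PySem.Dict String Int × List (List Int) × Int) (doc : List String) :
    PySem.Dict String Int × List (List Int) × Int :=
  let r := doc.foldl pvAStepWord (st.1, [], st.2.2)
  (r.1, st.2.1 ++ [r.2.1], r.2.2)

def create_vocab_and_encode (text_data : List (List String)) :
    (List (String × Int)) × List (List Int) :=
  let r := text_data.foldl pvAStepDoc (PySem.Dict.empty, [], 1)
  (r.1.items, r.2.1)

-- ===== PORT B =====
-- pass 1 loop body: record an unseen word with id len(vocab) + 1
def pvBAddWord (v : PySem.Dict String Int) (w : String) : PySem.Dict String Int :=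
  if v.contains w then v else v.insert w ((v.size : Int) + 1)

def pvBVocab (text_data : List (List String)) : PySem.Dict String Int :=
  text_data.foldl (fun v doc => doc.foldl pvBAddWord v) PySem.Dict.empty

def create_vocab_and_encode_alt (text_data : List (List String)) :
    (List (String × Int)) × List (List Int) :=
  let vocab := pvBVocab text_data
  -- pass 2: vocab[word]; every word was inserted in pass 1, so `getD w 0` is exact
  (vocab.items, text_data.map (fun doc => doc.map (fun w => vocab.getD w 0)))

-- ===== PRECONDITION & SPEC =====
def Spec_create_vocab_and_encode (text_data : List (List String)) (out : (List (String × Int)) × List (List Int)) : Prop := out = create_vocab_and_encode_alt text_data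
instance (text_data : List (List String)) (out : (List (String × Int)) × List (List Int)) : Decidable (Spec_create_vocab_and_encode text_data out) := by unfold Spec_create_vocab_and_encode; infer_instance

-- ===== CLAIM (what is proved, stated in full; the proofs are below) =====
def Claim_equal_create_vocab_and_encode : Prop := ∀ (text_data : List (List String)), Dom_create_vocab_and_encode text_data → Spec_create_vocab_and_encode text_data (create_vocab_and_encode text_data)

-- ===== LEMMAS AND PROOFS =====

-- `d'` answers every lookup `d` answers, with the same value
def pvExt (d d' : PySem.Dict String Int) : Prop :=
  ∀ k x, d.get? k = some x → d'.get? k = some x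

theorem pvExt_refl (d : PySem.Dict String Int) : pvExt d d := fun _ _ h => h

theorem pvExt_trans {a b c : PySem.Dict String Int} (h1 : pvExt a b) (h2 : pvExt b c) :
    pvExt a c := fun k x h => h2 k x (h1 k x h)

theorem pvExt_addWord (v : PySem.Dict String Int) (w : String) : pvExt v (pvBAddWord v w) := by
  intro k x h
  unfold pvBAddWord
  by_cases hc : v.contains w = true
  · simp [hc, h]
  · have hkw : k ≠ w := by
      intro he; subst he
      rw [PySem.Dict.contains_eq_isSome_get?, h] at hc
      simp at hc
    simp [hc, PySem.Dict.get?_insert_of_ne _ _ hkw, h]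

theorem pvExt_words (v : PySem.Dict String Int) (ws : List String) :
    pvExt v (ws.foldl pvBAddWord v) := by
  induction ws generalizing v with
  | nil => exact pvExt_refl v
  | cons w ws ih =>
      exact pvExt_trans (pvExt_addWord v w) (ih (pvBAddWord v w))

theorem pvExt_all (v : PySem.Dict String Int) (docs : List (List String)) :
    pvExt v (docs.foldl (fun v doc => doc.foldl pvBAddWord v) v) := by
  induction docs generalizing v with
  | nil => exact pvExt_refl v
  | cons d ds ih =>
      exact pvExt_trans (pvExt_words v d) (ih (d.foldl pvBAddWord v))

theorem pvInner (ws : List String) (v : PySem.Dict String Int) (doc : List Int) (idx : Int)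
    (hidx : idx = (v.size : Int) + 1) (V : PySem.Dict String Int)
    (hV : pvExt (ws.foldl pvBAddWord v) V) :
    ws.foldl pvAStepWord (v, doc, idx)
      = (ws.foldl pvBAddWord v, doc ++ ws.map (fun w => V.getD w 0),
         ((ws.foldl pvBAddWord v).size : Int) + 1) := by
  induction ws generalizing v doc idx with
  | nil => simp [hidx]
  | cons w ws ih =>
      by_cases hc : v.contains w = true
      · obtain ⟨x, hx⟩ : ∃ x, v.get? w = some x := by
          rw [PySem.Dict.contains_eq_isSome_get?] at hc
          exact Option.isSome_iff_exists.mp hc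
        have hVx : V.get? w = some x := by
          have : pvExt (ws.foldl pvBAddWord v) V := by
            simpa [pvBAddWord, hc] using hV
          exact this w x (pvExt_words v ws w x hx)
        have hstep : pvAStepWord (v, doc, idx) w
            = (v, doc ++ [x], idx) := by
          simp [pvAStepWord, hc, PySem.Dict.getD_of_get?_eq_some _ 0 hx]
        have hVd : V.getD w 0 = x := PySem.Dict.getD_of_get?_eq_some _ 0 hVx
        simp only [List.foldl_cons, hstep, pvBAddWord, hc, if_true]
        rw [ih v (doc ++ [x]) idx hidx (by simpa [pvBAddWord, hc] using hV)]
        simp [hVd]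
      · have hc' : v.contains w = false := by simpa using hc
        have hstep : pvAStepWord (v, doc, idx) w
            = (v.insert w idx, doc ++ [idx], idx + 1) := by
          simp [pvAStepWord, hc']
        have hB : pvBAddWord v w = v.insert w idx := by
          simp [pvBAddWord, hc', hidx]
        have hsize : idx + 1 = ((v.insert w idx).size : Int) + 1 := by
          rw [PySem.Dict.size_insert]
          simp [hc', hidx]
        have hVi : V.get? w = some idx := by
          have h1 : (v.insert w idx).get? w = some idx := PySem.Dict.get?_insert_self _ _ _
          have h2 := pvExt_words (v.insert w idx) ws w idx h1
          have : pvExt (ws.foldl pvBAddWord (pvBAddWord v w)) V := by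
            simpa using hV
          rw [hB] at this
          exact this w idx h2
        have hVd : V.getD w 0 = idx := PySem.Dict.getD_of_get?_eq_some _ 0 hVi
        simp only [List.foldl_cons, hstep, hB]
        rw [ih (v.insert w idx) (doc ++ [idx]) (idx + 1) hsize
            (by simp only [List.foldl_cons] at hV; rw [hB] at hV; exact hV)]
        simp [hVd]

theorem pvOuter (docs : List (List String)) (v : PySem.Dict String Int)
    (enc : List (List Int)) (idx : Int)
    (hidx : idx = (v.size : Int) + 1) (V : PySem.Dict String Int)
    (hV : pvExt (docs.foldl (fun v doc => doc.foldl pvBAddWord v) v) V) :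
    docs.foldl pvAStepDoc (v, enc, idx)
      = (docs.foldl (fun v doc => doc.foldl pvBAddWord v) v,
         enc ++ docs.map (fun d => d.map (fun w => V.getD w 0)),
         ((docs.foldl (fun v doc => doc.foldl pvBAddWord v) v).size : Int) + 1) := by
  induction docs generalizing v enc idx with
  | nil => simp [hidx]
  | cons d ds ih =>
      have hVd : pvExt (d.foldl pvBAddWord v) V := by
        have h1 := pvExt_all (d.foldl pvBAddWord v) ds
        have h2 : pvExt (ds.foldl (fun v doc => doc.foldl pvBAddWord v) (d.foldl pvBAddWord v)) V := by
          simpa using hV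
        exact pvExt_trans h1 h2
      have hstep : pvAStepDoc (v, enc, idx) d
          = (d.foldl pvBAddWord v, enc ++ [d.map (fun w => V.getD w 0)],
             ((d.foldl pvBAddWord v).size : Int) + 1) := by
        simp only [pvAStepDoc]
        rw [pvInner d v [] idx hidx V hVd]
        simp
      simp only [List.foldl_cons, hstep]
      rw [ih (d.foldl pvBAddWord v) (enc ++ [d.map (fun w => V.getD w 0)]) _ rfl
          (by simpa using hV)]
      simp

-- ===== VERDICT (by name: the statement is the Claim_ definition above) =====
theorem create_vocab_and_encode_spec : Claim_equal_create_vocab_and_encode := by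
  intro text_data _
  unfold Spec_create_vocab_and_encode create_vocab_and_encode create_vocab_and_encode_alt pvBVocab
  rw [pvOuter text_data PySem.Dict.empty [] 1 (by simp) _
      (pvExt_refl (text_data.foldl (fun v doc => doc.foldl pvBAddWord v) PySem.Dict.empty))]
  simp
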